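-- pv_equiv track=rewrite | github.com/viveksahu92/hacktoberfest25 | amazon-parcel-shipper/parcel_shipper.py | getMinUnshippedParcels
-- ===== SOURCE A (Python) =====
-- def getMinUnshippedParcels(weights, max_wt):
--     """
--     Find the minimum number of parcels that cannot be shipped.
--
--     Algorithm:
--     1. Sort parcels in descending order (ship heaviest first while capacity is high)
--     2. For each trip, try to ship a parcel with weight < current max_wt
--     3. After each trip, max_wt decreases by 1
--     4. Count parcels that cannot be shipped
--
--     Parameters:
--     -----------
--     weights : list[int]
--         The weights of the parcels
--     max_wt : int
--         The maximum weight the truck can carry initially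
--
--     Returns:
--     --------
--     int : The minimum number of parcels that cannot be shipped
--
--     Time Complexity: O(n log n) due to sorting
--     Space Complexity: O(n) for the sorted array
--     """
--     # Edge case: empty weights array
--     if not weights:
--         return 0
--
--     # Edge case: max_wt is 0 or negative
--     if max_wt <= 0:
--         return len(weights)
--
--     # Sort parcels in descending order to ship heaviest first
--     sorted_weights = sorted(weights, reverse=True)
--
--     current_capacity = max_wt
--     shipped_count = 0
--
--     # Try to ship each parcel
--     for weight in sorted_weights:
--         # If current parcel can be shipped (weight < current_capacity)
--         if weight < current_capacity:
--             shipped_count += 1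
--             current_capacity -= 1  # Capacity decreases after each trip
--
--             # If capacity becomes 0 or negative, no more parcels can be shipped
--             if current_capacity <= 0:
--                 break
--         # If parcel cannot be shipped, continue checking lighter parcels
--
--     # Return count of unshipped parcels
--     return len(weights) - shipped_count
-- ===== SOURCE B (Python) =====
-- def getMinUnshippedParcels(weights, max_wt):
--     if not weights:
--         return 0
--     if max_wt <= 0:
--         return len(weights)
--     asc = sorted(weights)
--     running_max = 0  # capacity head-room must stay positive, hence the 0 floor
--     shipped = 0
--     for j, a in enumerate(asc):
--         running_max = max(running_max, a - j)
--         if running_max + (j + 1) <= max_wt: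
--             shipped = j + 1
--         else:
--             break
--     return len(weights) - shipped
-- ===== Notes on version B (the rewrite author's own statement) =====
-- stated objective: alternative
-- what changed: Replaces the descending-sort trip-by-trip greedy simulation with an ascending sort plus a single prefix-max scan: shipped = largest k with max(0, max_{j<k}(a_j - j)) + k <= max_wt, stopping at the first failure of this monotone condition.
import Mathlib
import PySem

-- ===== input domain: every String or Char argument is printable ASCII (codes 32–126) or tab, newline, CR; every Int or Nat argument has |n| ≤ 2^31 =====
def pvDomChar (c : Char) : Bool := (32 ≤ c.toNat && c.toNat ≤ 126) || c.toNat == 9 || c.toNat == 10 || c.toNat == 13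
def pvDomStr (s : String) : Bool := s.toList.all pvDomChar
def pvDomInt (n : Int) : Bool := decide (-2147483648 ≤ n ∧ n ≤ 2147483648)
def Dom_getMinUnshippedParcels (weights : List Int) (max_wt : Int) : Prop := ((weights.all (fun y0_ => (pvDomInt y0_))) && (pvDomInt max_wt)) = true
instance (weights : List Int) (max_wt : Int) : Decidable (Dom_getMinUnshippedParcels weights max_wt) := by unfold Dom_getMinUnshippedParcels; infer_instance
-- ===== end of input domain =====

-- B replaces A's descending-greedy trip simulation by an ascending sort and a single
-- prefix-max scan (same O(n log n) cost; a genuinely different characterization of the answer).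

-- ===== PORT A =====
-- the for-loop over the descending list: state = (remaining, current_capacity, shipped_count)
def pvLoopA : List Int → Int → Int → Int
  | [], _, shipped => shipped
  | w :: ws, c, shipped =>
    if w < c then
      if c - 1 ≤ 0 then shipped + 1
      else pvLoopA ws (c - 1) (shipped + 1)
    else pvLoopA ws c shipped

def getMinUnshippedParcels (weights : List Int) (max_wt : Int) : Int :=
  if weights = [] then 0
  else if max_wt ≤ 0 then PySem.List.len weights
  else PySem.List.len weights - pvLoopA (PySem.List.sorted weights (fun x => x) true) max_wt 0

-- ===== PORT B =====
-- the enumerate-loop over the ascending list: state = (remaining, j, running_max, shipped)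
def pvLoopB : List Int → Int → Int → Int → Int → Int
  | [], _, _, shipped, _ => shipped
  | a :: rest, j, rm, shipped, c =>
    let rm' := max rm (a - j)
    if rm' + (j + 1) ≤ c then pvLoopB rest (j + 1) rm' (j + 1) c
    else shipped

def getMinUnshippedParcels_alt (weights : List Int) (max_wt : Int) : Int :=
  if weights = [] then 0
  else if max_wt ≤ 0 then PySem.List.len weights
  else PySem.List.len weights - pvLoopB (PySem.List.sorted weights (fun x => x) false) 0 0 0 max_wt

-- ===== PRECONDITION & SPEC =====
def Spec_getMinUnshippedParcels (weights : List Int) (max_wt : Int) (out : Int) : Prop := out = getMinUnshippedParcels_alt weights max_wt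
instance (weights : List Int) (max_wt : Int) (out : Int) : Decidable (Spec_getMinUnshippedParcels weights max_wt out) := by unfold Spec_getMinUnshippedParcels; infer_instance

-- ===== CLAIM (what is proved, stated in full; the proofs are below) =====
def Claim_equal_getMinUnshippedParcels : Prop := ∀ (weights : List Int) (max_wt : Int), Dom_getMinUnshippedParcels weights max_wt → Spec_getMinUnshippedParcels weights max_wt (getMinUnshippedParcels weights max_wt)

-- ===== LEMMAS AND PROOFS =====

-- "the k smallest parcels (ascending list asc) all fit": k trips remain possible
-- (k ≤ c) and the j-th smallest, shipped with capacity c - (k-1-j), fits.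
def pvGood (asc : List Int) (c : Int) (k : Nat) : Bool :=
  decide ((k : Int) ≤ c) && decide (∀ j : Nat, j < k → asc.getD j 0 - (j : Int) + (k : Int) ≤ c)

def pvK (asc : List Int) (c : Int) : Nat :=
  Nat.findGreatest (fun k => pvGood asc c k = true) asc.length

-- prefix maximum of (a_i - i), floored at 0
def pvPMAux : List Int → Int → Int → Int
  | [], _, acc => acc
  | a :: rest, i, acc => pvPMAux rest (i + 1) (max acc (a - i))

def pvPM (pre : List Int) : Int := pvPMAux pre 0 0

lemma pvGood_mono {asc : List Int} {c : Int} {k m : Nat} (hkm : k ≤ m)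
    (h : pvGood asc c m = true) : pvGood asc c k = true := by
  simp only [pvGood, Bool.and_eq_true, decide_eq_true_eq] at h ⊢
  obtain ⟨h1, h2⟩ := h
  have hkmi : (k : Int) ≤ (m : Int) := by exact_mod_cast hkm
  refine ⟨by omega, fun j hj => ?_⟩
  have := h2 j (lt_of_lt_of_le hj hkm)
  omega

lemma pvK_spec_of_pos {asc : List Int} {c : Int} (h : pvK asc c ≠ 0) :
    pvGood asc c (pvK asc c) = true := by
  unfold pvK at h ⊢
  exact (Nat.findGreatest_eq_iff.1 rfl).2.1 h

lemma pvK_le_of_not {asc : List Int} {c : Int} {k : Nat}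
    (h : pvGood asc c (k + 1) = false) : pvK asc c ≤ k := by
  by_contra hlt
  have hlt' : k + 1 ≤ pvK asc c := by omega
  have hK : pvGood asc c (pvK asc c) = true := pvK_spec_of_pos (by omega)
  have := pvGood_mono hlt' hK
  simp [this] at h

lemma pvK_ge {asc : List Int} {c : Int} {k : Nat} (hk : k ≤ asc.length)
    (h : pvGood asc c k = true) : k ≤ pvK asc c :=
  Nat.le_findGreatest hk h

lemma pvK_le_len (asc : List Int) (c : Int) : pvK asc c ≤ asc.length :=
  Nat.findGreatest_le _

lemma pvGood_append_left {asc : List Int} {w c : Int} {k : Nat} (hk : k ≤ asc.length) :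
    pvGood (asc ++ [w]) c k = pvGood asc c k := by
  have hiff : (∀ j : Nat, j < k → (asc ++ [w]).getD j 0 - (j : Int) + (k : Int) ≤ c)
      ↔ (∀ j : Nat, j < k → asc.getD j 0 - (j : Int) + (k : Int) ≤ c) := by
    constructor <;> intro h j hj <;> have hjl := lt_of_lt_of_le hj hk
    · have := h j hj; rwa [List.getD_append _ _ _ _ hjl] at this
    · have := h j hj; rwa [List.getD_append _ _ _ _ hjl]
  simp only [pvGood]
  congr 1
  exact decide_eq_decide.mpr hiff

-- cond in B's loop ⟺ pvGood at (pre.length + 1)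
lemma pvPMAux_le_iff (pre : List Int) (i acc t : Int) :
    pvPMAux pre i acc ≤ t ↔ acc ≤ t ∧ ∀ k : Nat, k < pre.length → pre.getD k 0 - (i + k) ≤ t := by
  induction pre generalizing i acc with
  | nil => simp [pvPMAux]
  | cons a rest ih =>
    simp only [pvPMAux, ih, max_le_iff, List.length_cons]
    constructor
    · rintro ⟨⟨h1, h2⟩, h3⟩
      refine ⟨h1, fun k hk => ?_⟩
      cases k with
      | zero => simpa using h2
      | succ k =>
        have := h3 k (by omega)
        simp only [List.getD_cons_succ]
        push_cast at this ⊢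
        linarith
    · rintro ⟨h1, h2⟩
      refine ⟨⟨h1, by simpa using h2 0 (by omega)⟩, fun k hk => ?_⟩
      have := h2 (k + 1) (by omega)
      simp only [List.getD_cons_succ] at this
      push_cast at this ⊢
      linarith

lemma pvPMAux_append (pre : List Int) (a i acc : Int) :
    pvPMAux (pre ++ [a]) i acc = max (pvPMAux pre i acc) (a - (i + pre.length)) := by
  induction pre generalizing i acc with
  | nil => simp [pvPMAux]
  | cons b rest ih =>
    simp only [List.cons_append, pvPMAux, ih, List.length_cons]
    push_cast
    ring_nf

lemma pvCond_iff (pre rest : List Int) (a c : Int) :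
    (max (pvPM pre) (a - (pre.length : Int)) + ((pre.length : Int) + 1) ≤ c)
      ↔ pvGood (pre ++ a :: rest) c (pre.length + 1) = true := by
  have hlen : pre.length < (pre ++ a :: rest).length := by simp
  simp only [pvGood, Bool.and_eq_true, decide_eq_true_eq, pvPM]
  constructor
  · intro h
    have h' : max (pvPMAux pre 0 0) (a - (pre.length : Int)) ≤ c - ((pre.length : Int) + 1) := by omega
    rw [max_le_iff] at h'
    obtain ⟨h1, h2⟩ := h'
    rw [pvPMAux_le_iff] at h1
    obtain ⟨h10, h11⟩ := h1
    refine ⟨by push_cast; omega, fun j hj => ?_⟩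
    rcases Nat.lt_or_ge j pre.length with hjl | hjl
    · have := h11 j hjl
      rw [List.getD_append _ _ _ _ hjl]
      push_cast at this ⊢
      omega
    · have hj' : j = pre.length := by omega
      subst hj'
      rw [List.getD_append_right _ _ _ _ (le_refl _)]
      simp only [Nat.sub_self, List.getD_cons_zero]
      push_cast
      omega
  · rintro ⟨h1, h2⟩
    have hmax : max (pvPMAux pre 0 0) (a - (pre.length : Int)) ≤ c - ((pre.length : Int) + 1) := by
      rw [max_le_iff, pvPMAux_le_iff]
      refine ⟨⟨by push_cast at h1 ⊢; omega, fun k hk => ?_⟩, ?_⟩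
      · have := h2 k (by omega)
        rw [List.getD_append _ _ _ _ hk] at this
        push_cast at this ⊢
        omega
      · have := h2 pre.length (by omega)
        rw [List.getD_append_right _ _ _ _ (le_refl _)] at this
        simp only [Nat.sub_self, List.getD_cons_zero] at this
        push_cast at this ⊢
        omega
    omega

-- B's loop computes pvK (generalized over the processed prefix)
lemma pvLoopB_gen (rest : List Int) : ∀ (pre : List Int) (c : Int),
    pvGood (pre ++ rest) c pre.length = true →
    pvLoopB rest (pre.length : Int) (pvPM pre) (pre.length : Int) c = (pvK (pre ++ rest) c : Int) := by
  induction rest with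
  | nil =>
    intro pre c hg
    simp only [pvLoopB, List.append_nil] at *
    have h1 := pvK_ge (le_refl pre.length) hg
    have h2 := pvK_le_len pre c
    omega
  | cons a rest ih =>
    intro pre c hg
    simp only [pvLoopB]
    by_cases hcond : max (pvPM pre) (a - (pre.length : Int)) + ((pre.length : Int) + 1) ≤ c
    · rw [if_pos hcond]
      have hg' : pvGood (pre ++ a :: rest) c (pre.length + 1) = true := (pvCond_iff pre rest a c).mp hcond
      have := ih (pre ++ [a]) c (by rw [List.append_assoc]; simpa using hg')
      simp only [pvPM, pvPMAux_append, List.length_append, List.length_nil,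
        List.length_cons, List.append_assoc, List.cons_append, List.nil_append] at this
      push_cast at this
      simp only [pvPM]
      convert this using 3
      ring
    · rw [if_neg hcond]
      have hng : pvGood (pre ++ a :: rest) c (pre.length + 1) = false := by
        cases h : pvGood (pre ++ a :: rest) c (pre.length + 1)
        · rfl
        · exact absurd ((pvCond_iff pre rest a c).mpr h) hcond
      have h1 := pvK_ge (asc := pre ++ a :: rest) (c := c) (k := pre.length) (by simp) hg
      have h2 := pvK_le_of_not hng
      omega

lemma pvLoopB_eq_pvK (asc : List Int) (c : Int) (hc : 1 ≤ c) :
    pvLoopB asc 0 0 0 c = (pvK asc c : Int) := by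
  have := pvLoopB_gen asc [] c (by simp [pvGood]; omega)
  simpa [pvPM, pvPMAux] using this

-- shipped accumulator in A's loop is additive
lemma pvLoopA_shift (d : List Int) : ∀ (c s : Int), pvLoopA d c s = s + pvLoopA d c 0 := by
  induction d with
  | nil => intro c s; simp [pvLoopA]
  | cons w ws ih =>
    intro c s
    simp only [pvLoopA]
    split_ifs with h1 h2
    · ring
    · rw [ih (c - 1) (s + 1), ih (c - 1) (0 + 1)]; ring
    · exact ih c s

lemma pvGood_false_of_top {asc : List Int} {w c : Int} (hw : ¬ w < c) :
    pvGood (asc ++ [w]) c (asc.length + 1) = false := by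
  cases h : pvGood (asc ++ [w]) c (asc.length + 1)
  · rfl
  · exfalso
    simp only [pvGood, Bool.and_eq_true, decide_eq_true_eq] at h
    have := h.2 asc.length (by omega)
    rw [List.getD_append_right _ _ _ _ (le_refl _)] at this
    simp only [Nat.sub_self, List.getD_cons_zero] at this
    omega

lemma pvFindGreatest_congr {P Q : Nat → Prop} [DecidablePred P] [DecidablePred Q] :
    ∀ n, (∀ k, k ≤ n → (P k ↔ Q k)) → Nat.findGreatest P n = Nat.findGreatest Q n := by
  intro n
  induction n with
  | zero => intro _; rfl
  | succ n ih =>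
    intro h
    rw [Nat.findGreatest_succ, Nat.findGreatest_succ]
    by_cases hp : P (n + 1)
    · rw [if_pos hp, if_pos ((h (n + 1) (le_refl _)).mp hp)]
    · rw [if_neg hp, if_neg (fun hq => hp ((h (n + 1) (le_refl _)).mpr hq))]
      exact ih (fun k hk => h k (by omega))

-- skipping an unshippable maximum does not change pvK
lemma pvK_skip {asc : List Int} {w c : Int} (hw : ¬ w < c) :
    pvK (asc ++ [w]) c = pvK asc c := by
  unfold pvK
  have hlen : (asc ++ [w]).length = asc.length + 1 := by simp
  rw [hlen, Nat.findGreatest_succ, if_neg (by simp [pvGood_false_of_top hw])]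
  exact pvFindGreatest_congr asc.length
    (fun k hk => by rw [pvGood_append_left hk])

-- shipping the maximum: pvK grows by one while the capacity drops by one
lemma pvGood_ship_iff {asc : List Int} {w c : Int} (hmax : ∀ x ∈ asc, x ≤ w) (hw : w < c)
    {k : Nat} (hk : k ≤ asc.length) :
    (pvGood (asc ++ [w]) c (k + 1) = true ↔ pvGood asc (c - 1) k = true) := by
  simp only [pvGood, Bool.and_eq_true, decide_eq_true_eq]
  constructor
  · rintro ⟨h1, h2⟩
    refine ⟨by push_cast at h1 ⊢; omega, fun j hj => ?_⟩
    have := h2 j (by omega)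
    rw [List.getD_append _ _ _ _ (lt_of_lt_of_le hj hk)] at this
    push_cast at this ⊢
    omega
  · rintro ⟨h1, h2⟩
    refine ⟨by push_cast at h1 ⊢; omega, fun j hj => ?_⟩
    rcases Nat.lt_or_ge j k with hjk | hjk
    · have := h2 j hjk
      rw [List.getD_append _ _ _ _ (lt_of_lt_of_le hjk hk)]
      push_cast at this ⊢
      omega
    · have hjeq : j = k := by omega
      subst hjeq
      have helem : (asc ++ [w]).getD j 0 ≤ w := by
        rcases Nat.lt_or_ge j asc.length with hja | hja
        · rw [List.getD_append _ _ _ _ hja]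
          rw [List.getD_eq_getElem _ _ hja]
          exact hmax _ (List.getElem_mem hja)
        · have : j = asc.length := by omega
          subst this
          rw [List.getD_append_right _ _ _ _ (le_refl _)]
          simp
      push_cast
      omega

lemma pvK_ship {asc : List Int} {w c : Int} (hmax : ∀ x ∈ asc, x ≤ w) (hw : w < c) (hc : 2 ≤ c) :
    pvK (asc ++ [w]) c = pvK asc (c - 1) + 1 := by
  set k' := pvK asc (c - 1) with hk'
  have hk'len : k' ≤ asc.length := pvK_le_len asc (c - 1)
  have hgs : pvGood asc (c - 1) k' = true := by
    rcases Nat.eq_zero_or_pos k' with h0 | hpos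
    · rw [h0]; simp [pvGood]; omega
    · exact pvK_spec_of_pos (by omega)
  have hgb : pvGood (asc ++ [w]) c (k' + 1) = true := (pvGood_ship_iff hmax hw hk'len).mpr hgs
  have hge : k' + 1 ≤ pvK (asc ++ [w]) c := pvK_ge (by simpa using Nat.succ_le_succ hk'len) hgb
  have hle : pvK (asc ++ [w]) c ≤ k' + 1 := by
    rcases Nat.lt_or_ge k' asc.length with hb | hb
    · apply pvK_le_of_not
      cases h : pvGood (asc ++ [w]) c (k' + 1 + 1)
      · rfl
      · exfalso
        have := (pvGood_ship_iff hmax hw (k := k' + 1) (by omega)).mp h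
        have := pvK_ge (asc := asc) (c := c - 1) (k := k' + 1) (by omega) this
        omega
    · have := pvK_le_len (asc ++ [w]) c
      simp only [List.length_append, List.length_cons, List.length_nil] at this
      omega
  omega

-- A's greedy over a descending list computes pvK of its reversal
lemma pvLoopA_eq (d : List Int) : ∀ (c : Int), d.Pairwise (fun a b => b ≤ a) → 1 ≤ c →
    pvLoopA d c 0 = (pvK d.reverse c : Int) := by
  induction d with
  | nil => intro c _ _; simp [pvLoopA, pvK]
  | cons w d' ih =>
    intro c hp hc
    have hmax : ∀ x ∈ d'.reverse, x ≤ w := by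
      intro x hx
      exact (List.pairwise_cons.mp hp).1 x (List.mem_reverse.mp hx)
    have htail : d'.Pairwise (fun a b => b ≤ a) := (List.pairwise_cons.mp hp).2
    simp only [pvLoopA, List.reverse_cons]
    split_ifs with h1 h2
    · -- shipped, capacity exhausted: c = 1
      have hc1 : c = 1 := by omega
      subst hc1
      have hg1 : pvGood (d'.reverse ++ [w]) 1 1 = true := by
        simp only [pvGood, Bool.and_eq_true, decide_eq_true_eq]
        refine ⟨by norm_num, fun j hj => ?_⟩
        have hj0 : j = 0 := by omega
        subst hj0
        have helem : (d'.reverse ++ [w]).getD 0 0 ≤ w := by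
          rcases Nat.eq_zero_or_pos d'.reverse.length with h0 | hpos
          · rw [List.getD_append_right _ _ _ _ (by omega)]
            simp [h0]
          · rw [List.getD_append _ _ _ _ hpos]
            rw [List.getD_eq_getElem _ _ hpos]
            exact hmax _ (List.getElem_mem hpos)
        push_cast
        omega
      have hge : 1 ≤ pvK (d'.reverse ++ [w]) 1 := pvK_ge (by simp) hg1
      have hle : pvK (d'.reverse ++ [w]) 1 ≤ 1 := by
        apply pvK_le_of_not
        cases h : pvGood (d'.reverse ++ [w]) 1 2
        · rfl
        · exfalso
          simp only [pvGood, Bool.and_eq_true, decide_eq_true_eq] at h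
          omega
      omega
    · -- shipped, capacity remains
      rw [pvLoopA_shift, ih (c - 1) htail (by omega), pvK_ship hmax h1 (by omega)]
      push_cast
      ring
    · -- skipped
      rw [ih c htail hc, pvK_skip h1]

-- the two sort orders are reverses of each other
lemma pvSorted_rev_reverse (weights : List Int) :
    (PySem.List.sorted weights (fun x => x) true).reverse = PySem.List.sorted weights (fun x => x) false := by
  symm
  apply PySem.List.sorted_id_eq_of_perm_of_pairwise
  · exact (List.reverse_perm _).trans (PySem.List.sorted_perm _ _ _)
  · rw [List.pairwise_reverse]
    exact PySem.List.sorted_pairwise_rev weights (fun x => x) |>.imp (fun h => h)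

-- ===== VERDICT (by name: the statement is the Claim_ definition above) =====
theorem getMinUnshippedParcels_spec : Claim_equal_getMinUnshippedParcels := by
  intro weights max_wt _
  unfold Spec_getMinUnshippedParcels getMinUnshippedParcels getMinUnshippedParcels_alt
  by_cases h0 : weights = []
  · simp [h0]
  · rw [if_neg h0, if_neg h0]
    by_cases h1 : max_wt ≤ 0
    · rw [if_pos h1, if_pos h1]
    · rw [if_neg h1, if_neg h1]
      have hdesc := pvLoopA_eq (PySem.List.sorted weights (fun x => x) true) max_wt
        (PySem.List.sorted_pairwise_rev weights (fun x => x)) (by omega)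
      rw [hdesc, pvSorted_rev_reverse]
      rw [pvLoopB_eq_pvK _ max_wt (by omega)]
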